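-- pv_equiv track=rewrite | github.com/akshay/MSW-RUID | pop-ruids.py | _build_guid_tag_name_index
-- ===== SOURCE A (Python) =====
-- from typing import Dict, List, Optional, Set, Tuple
--
-- def _is_fallback_tag(category_tag: Optional[str], tag_name: str, guid: str) -> bool:
--     """Return True when a tag is the synthetic category-guid fallback."""
--     return bool(category_tag) and tag_name == f'{category_tag}-{guid}'
--
-- def _build_guid_tag_name_index(category_tag: Optional[str], all_tags: Dict[str, str]) -> Dict[str, str]:
--     """Build a GUID->tag index, preferring payload-derived tags over fallback names."""
--     guid_tag_names: Dict[str, str] = {}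
--
--     for tag_name, guid in all_tags.items():
--         current_tag_name = guid_tag_names.get(guid)
--         if current_tag_name is None:
--             guid_tag_names[guid] = tag_name
--             continue
--
--         if _is_fallback_tag(category_tag, current_tag_name, guid) and not _is_fallback_tag(category_tag, tag_name, guid):
--             guid_tag_names[guid] = tag_name
--
--     return guid_tag_names
-- ===== SOURCE B (Python) =====
-- from typing import Dict, Optional
--
--
-- def _is_fallback_tag(category_tag: Optional[str], tag_name: str, guid: str) -> bool:
--     return bool(category_tag) and tag_name == f'{category_tag}-{guid}'
--
--
-- def _build_guid_tag_name_index(category_tag: Optional[str], all_tags: Dict[str, str]) -> Dict[str, str]: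
--     """Group tag names by guid, then pick the first non-fallback tag (default: first tag)."""
--     groups: Dict[str, list] = {}
--     for tag_name, guid in all_tags.items():
--         groups.setdefault(guid, []).append(tag_name)
--     return {
--         guid: next((t for t in names if not _is_fallback_tag(category_tag, t, guid)), names[0])
--         for guid, names in groups.items()
--     }
-- ===== Notes on version B (the rewrite author's own statement) =====
-- stated objective: simpler
-- what changed: Replaces the streaming replace-if-better dict update (lookup current entry, overwrite when it is a fallback and the new tag is not) with an explicit group-by-guid pass followed by a per-guid selection of the first non-fallback tag defaulting to the first tag; the fallback check runs once per tag instead of twice per collision.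
import Mathlib
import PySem

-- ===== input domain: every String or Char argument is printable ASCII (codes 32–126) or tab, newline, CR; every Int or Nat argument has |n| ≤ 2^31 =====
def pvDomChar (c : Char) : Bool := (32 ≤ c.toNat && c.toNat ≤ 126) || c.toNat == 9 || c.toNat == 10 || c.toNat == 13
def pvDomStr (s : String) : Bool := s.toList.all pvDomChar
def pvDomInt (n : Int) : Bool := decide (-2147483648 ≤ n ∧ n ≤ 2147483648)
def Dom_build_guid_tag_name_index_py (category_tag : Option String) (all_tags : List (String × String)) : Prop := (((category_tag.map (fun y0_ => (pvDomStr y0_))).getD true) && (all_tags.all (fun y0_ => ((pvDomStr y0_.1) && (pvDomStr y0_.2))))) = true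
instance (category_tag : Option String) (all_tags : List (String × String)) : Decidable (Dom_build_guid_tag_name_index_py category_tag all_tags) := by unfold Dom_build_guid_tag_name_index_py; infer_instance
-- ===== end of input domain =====

-- B replaces A's streaming replace-if-better dict update with group-by-guid then
-- per-guid "first non-fallback, default first" selection (objective: simpler decomposition).

-- ===== PORT A =====
-- shared helper: Python's _is_fallback_tag (bool(category_tag) is false for None and "")
def pvFb (category_tag : Option String) (tag_name guid : String) : Bool :=
  match category_tag with
  | none => false
  | some c => (!(c == "")) && (tag_name == c ++ "-" ++ guid)

-- one iteration of A's for-loop body over the dict accumulator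
def pvStepA (category_tag : Option String) (d : PySem.Dict String String)
    (p : String × String) : PySem.Dict String String :=
  match d.get? p.2 with
  | none => d.insert p.2 p.1
  | some cur =>
    if pvFb category_tag cur p.2 && !(pvFb category_tag p.1 p.2) then d.insert p.2 p.1 else d

def build_guid_tag_name_index_py (category_tag : Option String)
    (all_tags : List (String × String)) : List (String × String) :=
  (all_tags.foldl (pvStepA category_tag) PySem.Dict.empty).items

-- ===== PORT B =====
-- next((t for t in names if not _is_fallback_tag(...)), names[0]); names is always
-- nonempty where B uses it, so the names[0] default is headD.
def pvSelect (category_tag : Option String) (guid : String) (names : List String) : String :=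
  match names.find? (fun t => !(pvFb category_tag t guid)) with
  | some t => t
  | none => names.headD ""

def build_guid_tag_name_index_py_alt (category_tag : Option String)
    (all_tags : List (String × String)) : List (String × String) :=
  let groups : PySem.Dict String (List String) :=
    all_tags.foldl (fun d p => d.modify p.2 [] (· ++ [p.1])) PySem.Dict.empty
  groups.items.map (fun kv => (kv.1, pvSelect category_tag kv.1 kv.2))

-- ===== PRECONDITION & SPEC =====
def Spec_build_guid_tag_name_index_py (category_tag : Option String) (all_tags : List (String × String)) (out : List (String × String)) : Prop := out = build_guid_tag_name_index_py_alt category_tag all_tags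
instance (category_tag : Option String) (all_tags : List (String × String)) (out : List (String × String)) : Decidable (Spec_build_guid_tag_name_index_py category_tag all_tags out) := by unfold Spec_build_guid_tag_name_index_py; infer_instance

-- ===== CLAIM (what is proved, stated in full; the proofs are below) =====
def Claim_equal_build_guid_tag_name_index_py : Prop := ∀ (category_tag : Option String) (all_tags : List (String × String)), Dom_build_guid_tag_name_index_py category_tag all_tags → Spec_build_guid_tag_name_index_py category_tag all_tags (build_guid_tag_name_index_py category_tag all_tags)

-- ===== LEMMAS AND PROOFS =====

-- A's per-guid state transition, abstracted from the dict
def pvStep1 (ct : Option String) (g : String) (o : Option String) (t : String) : Option String :=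
  match o with
  | none => some t
  | some c => if pvFb ct c g && !(pvFb ct t g) then some t else some c

-- the tags listed for guid g, in order
def pvGroup (l : List (String × String)) (g : String) : List String :=
  (l.filter (fun p => p.2 == g)).map (·.1)

theorem pvGroup_cons (p : String × String) (l : List (String × String)) (g : String) :
    pvGroup (p :: l) g = if p.2 = g then p.1 :: pvGroup l g else pvGroup l g := by
  simp only [pvGroup, List.filter_cons]
  by_cases h : p.2 = g <;> simp [h]

theorem keys_stepA (ct : Option String) (d : PySem.Dict String String) (p : String × String) :
    (pvStepA ct d p).keys = PySem.Set.add d.keys p.2 := by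
  cases hg : d.get? p.2 with
  | none =>
    have hc : d.contains p.2 = false := by
      rw [PySem.Dict.contains_eq_isSome_get?, hg]; rfl
    have hnm : p.2 ∉ d.keys := fun hm =>
      absurd ((PySem.Dict.contains_iff_mem_keys d p.2).mpr hm) (by simp [hc])
    simp only [pvStepA, hg]
    rw [PySem.Dict.keys_insert_of_not_contains d p.1 hc, PySem.Set.add_of_not_mem hnm]
  | some cur =>
    have hc : d.contains p.2 = true := by
      rw [PySem.Dict.contains_eq_isSome_get?, hg]; rfl
    have hm : p.2 ∈ d.keys := (PySem.Dict.contains_iff_mem_keys d p.2).mp hc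
    simp only [pvStepA, hg]
    rw [PySem.Set.add_of_mem hm]
    split
    · exact PySem.Dict.keys_insert_of_contains d p.1 hc
    · rfl

theorem keysA (ct : Option String) (l : List (String × String)) (d : PySem.Dict String String) :
    (l.foldl (pvStepA ct) d).keys = PySem.Set.update d.keys (l.map (·.2)) := by
  induction l generalizing d with
  | nil => rfl
  | cons p t ih =>
    simp only [List.foldl_cons, List.map_cons, PySem.Set.update_cons, ih, keys_stepA]

theorem nodupA (ct : Option String) (l : List (String × String)) :
    (l.foldl (pvStepA ct) PySem.Dict.empty).keys.Nodup := by
  rw [keysA]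
  exact PySem.Set.nodup_update _ _ List.nodup_nil

-- A's lookup at g is the per-guid fold of pvStep1 over the tags grouped at g
theorem getA (ct : Option String) (l : List (String × String)) (d : PySem.Dict String String)
    (g : String) :
    (l.foldl (pvStepA ct) d).get? g = (pvGroup l g).foldl (pvStep1 ct g) (d.get? g) := by
  induction l generalizing d with
  | nil => rfl
  | cons p t ih =>
    rw [List.foldl_cons, ih, pvGroup_cons]
    by_cases h : p.2 = g
    · subst h
      rw [if_pos rfl, List.foldl_cons]
      congr 1
      cases hg : d.get? p.2 with
      | none => simp [pvStepA, pvStep1, hg, PySem.Dict.get?_insert_self]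
      | some cur =>
        simp only [pvStepA, pvStep1, hg]
        split
        · simp [PySem.Dict.get?_insert_self]
        · exact hg
    · rw [if_neg h]
      congr 1
      have hne : g ≠ p.2 := fun e => h e.symm
      cases hg : d.get? p.2 with
      | none => simp only [pvStepA, hg]; exact PySem.Dict.get?_insert_of_ne d p.1 hne
      | some cur =>
        simp only [pvStepA, hg]
        split
        · exact PySem.Dict.get?_insert_of_ne d p.1 hne
        · rfl

-- once a non-fallback value is held it is final
theorem step1_stable (ct : Option String) (g : String) (c : String)
    (hc : pvFb ct c g = false) (t : List String) :
    t.foldl (pvStep1 ct g) (some c) = some c := by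
  induction t with
  | nil => rfl
  | cons h tl ih => simp only [List.foldl_cons, pvStep1, hc, Bool.false_and]; exact ih

-- from a fallback value: first non-fallback wins, else keep it
theorem step1_fb (ct : Option String) (g : String) (c : String)
    (hc : pvFb ct c g = true) (t : List String) :
    t.foldl (pvStep1 ct g) (some c) =
      some ((t.find? (fun x => !(pvFb ct x g))).getD c) := by
  induction t generalizing c with
  | nil => rfl
  | cons h tl ih =>
    rw [List.foldl_cons, List.find?_cons]
    by_cases hh : pvFb ct h g = true
    · simp only [pvStep1, hc, hh, Bool.not_true, Bool.and_false, Bool.false_eq_true, if_false]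
      exact ih c hc
    · simp only [Bool.not_eq_true] at hh
      simp only [pvStep1, hc, hh, Bool.not_false, Bool.and_true, if_true]
      rw [step1_stable ct g h hh tl]
      simp

theorem step1_select (ct : Option String) (g : String) (names : List String)
    (hne : names ≠ []) :
    names.foldl (pvStep1 ct g) none = some (pvSelect ct g names) := by
  cases names with
  | nil => exact absurd rfl hne
  | cons h t =>
    have hstep : pvStep1 ct g none h = some h := rfl
    rw [List.foldl_cons, hstep]
    unfold pvSelect
    rw [List.find?_cons]
    by_cases hh : pvFb ct h g = true
    · rw [step1_fb ct g h hh t]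
      simp only [hh, Bool.not_true]
      cases hf : t.find? (fun x => !(pvFb ct x g)) <;> simp [List.headD]
    · simp only [Bool.not_eq_true] at hh
      rw [step1_stable ct g h hh t]
      simp [hh]

-- B's group dict lookup is pvGroup
theorem getD_groups (l : List (String × String)) (d : PySem.Dict String (List String))
    (g : String) :
    (l.foldl (fun d p => d.modify p.2 [] (· ++ [p.1])) d).getD g [] =
      d.getD g [] ++ pvGroup l g := by
  induction l generalizing d with
  | nil => simp [pvGroup]
  | cons p t ih =>
    rw [List.foldl_cons, ih, pvGroup_cons, PySem.Dict.getD_modify]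
    by_cases h : p.2 = g
    · subst h; simp
    · rw [if_neg (fun e => h e.symm), if_neg h]

theorem mem_keys_group_ne_nil (l : List (String × String)) (g : String)
    (hm : g ∈ l.map (·.2)) : pvGroup l g ≠ [] := by
  simp only [List.mem_map] at hm
  obtain ⟨p, hp, hpg⟩ := hm
  simp only [pvGroup, ne_eq, List.map_eq_nil_iff, List.filter_eq_nil_iff]
  intro h
  exact absurd (by simp [hpg]) (h p hp)

-- ===== VERDICT (by name: the statement is the Claim_ definition above) =====
theorem build_guid_tag_name_index_py_spec : Claim_equal_build_guid_tag_name_index_py := by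
  intro ct l _
  show (l.foldl (pvStepA ct) PySem.Dict.empty).items =
    (l.foldl (fun d p => d.modify p.2 [] (· ++ [p.1]))
        (PySem.Dict.empty : PySem.Dict String (List String))).items.map
      (fun kv => (kv.1, pvSelect ct kv.1 kv.2))
  have hndA : (l.foldl (pvStepA ct) PySem.Dict.empty).keys.Nodup := nodupA ct l
  have hndG : (l.foldl (fun d p => d.modify p.2 [] (· ++ [p.1]))
      (PySem.Dict.empty : PySem.Dict String (List String))).keys.Nodup :=
    PySem.Dict.nodup_keys_foldl_modify_key l (fun p => p.2) [] (fun _ p => (· ++ [p.1]))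
      PySem.Dict.empty List.nodup_nil
  have hAkeys : (l.foldl (pvStepA ct) PySem.Dict.empty).keys =
      PySem.Set.update [] (l.map (·.2)) := keysA ct l PySem.Dict.empty
  have hGkeys : (l.foldl (fun d p => d.modify p.2 [] (· ++ [p.1]))
      (PySem.Dict.empty : PySem.Dict String (List String))).keys =
      PySem.Set.update [] (l.map (·.2)) :=
    PySem.Dict.keys_foldl_modify_key l (fun p => p.2) [] (fun _ p => (· ++ [p.1]))
      PySem.Dict.empty
  rw [PySem.Dict.items_eq_map_keys _ hndA "", PySem.Dict.items_eq_map_keys _ hndG [],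
    List.map_map, hAkeys, hGkeys]
  apply List.map_congr_left
  intro g hg
  have hgl : g ∈ l.map (·.2) := by
    simp only [PySem.Set.mem_update, List.not_mem_nil, false_or] at hg
    exact hg
  have hgrp : (l.foldl (fun d p => d.modify p.2 [] (· ++ [p.1]))
      (PySem.Dict.empty : PySem.Dict String (List String))).getD g [] = pvGroup l g := by
    rw [getD_groups]
    simp [PySem.Dict.getD_empty]
  have hget : (l.foldl (pvStepA ct) PySem.Dict.empty).get? g
      = some (pvSelect ct g (pvGroup l g)) := by
    rw [getA, PySem.Dict.get?_empty]
    exact step1_select ct g _ (mem_keys_group_ne_nil l g hgl)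
  simp only [Function.comp_apply]
  rw [hgrp, PySem.Dict.getD_eq_get?_getD, hget]
  rfl
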